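-- pv_equiv track=rewrite | github.com/kadirhanpolat/pytop | src/pytop/subset_operators.py | _derived_set
-- ===== SOURCE A (Python) =====
-- from typing import Any
--
-- def _derived_set(subset: set[Any], points: tuple[Any, ...], opens: list[set[Any]]) -> set[Any]:
--     derived: set[Any] = set()
--     for point in points:
--         deleted_subset = subset - {point}
--         neighborhoods = [open_set for open_set in opens if point in open_set]
--         if all(open_set & deleted_subset for open_set in neighborhoods):
--             derived.add(point)
--     return derived
-- ===== SOURCE B (Python) =====
-- def _derived_set(subset, points, opens):
--     # Precompute |open_set & subset| once per open set and keep, per element,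
--     # the minimum such count over the open sets containing it; then each point
--     # only needs a threshold comparison (2 if it is in subset, else 1).
--     best = {}
--     for open_set in opens:
--         c = len(open_set & subset)
--         for x in open_set:
--             m = best.get(x)
--             if m is None or c < m:
--                 best[x] = c
--     derived = set()
--     for p in points:
--         need = 2 if p in subset else 1
--         if best.get(p, need) >= need:
--             derived.add(p)
--     return derived
-- ===== Notes on version B (the rewrite author's own statement) =====
-- stated objective: faster
-- what changed: Instead of rescanning all open sets and intersecting with subset-{point} for every point, B computes |O∩subset| once per open set, records per element the minimum such count over the open sets containing it, and decides each point by one threshold comparison (2 if the point is in subset, else 1).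
import Mathlib
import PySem

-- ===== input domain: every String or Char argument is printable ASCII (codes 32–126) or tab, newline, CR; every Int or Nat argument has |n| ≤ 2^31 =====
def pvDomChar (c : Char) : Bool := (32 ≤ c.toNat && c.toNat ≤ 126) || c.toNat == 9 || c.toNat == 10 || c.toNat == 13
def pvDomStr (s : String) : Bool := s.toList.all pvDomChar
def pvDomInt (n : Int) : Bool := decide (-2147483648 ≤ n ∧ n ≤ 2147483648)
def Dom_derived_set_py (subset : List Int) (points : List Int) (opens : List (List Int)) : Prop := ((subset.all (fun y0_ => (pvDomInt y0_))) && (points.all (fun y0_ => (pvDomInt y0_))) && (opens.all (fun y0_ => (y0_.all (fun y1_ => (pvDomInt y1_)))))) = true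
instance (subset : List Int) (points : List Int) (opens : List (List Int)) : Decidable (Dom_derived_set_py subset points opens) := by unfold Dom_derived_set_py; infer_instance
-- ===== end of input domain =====

-- B replaces A's per-point rescan of all open sets by one precomputation of |O ∩ subset|
-- per open set and a per-element minimum, so each point is decided by one threshold compare (objective: faster).

-- ===== PORT A =====
-- literal port of _derived_set: for each point, filter the neighborhoods and test every intersection with subset - {point}
def derived_set_py (subset : List Int) (points : List Int) (opens : List (List Int)) : List Int :=
  points.foldl (fun derived point =>
    let deleted_subset := PySem.Set.diff (PySem.Set.ofList subset) [point]
    let neighborhoods := opens.filter (fun o => PySem.Set.contains (PySem.Set.ofList o) point)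
    if neighborhoods.all (fun o => !(PySem.Set.inter (PySem.Set.ofList o) deleted_subset).isEmpty)
    then PySem.Set.add derived point else derived) PySem.Set.empty

-- ===== PORT B =====
-- literal port of Source B: one pass over opens builds `best` (per element, the minimal |O ∩ subset|
-- over the open sets O containing it), then one threshold comparison per point
def derived_set_py_alt (subset : List Int) (points : List Int) (opens : List (List Int)) : List Int :=
  let sset := PySem.Set.ofList subset
  let best : PySem.Dict Int Int :=
    opens.foldl (fun best o =>
      let os := PySem.Set.ofList o
      let c : Int := PySem.Set.len (PySem.Set.inter os sset)
      os.foldl (fun b x =>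
        match PySem.Dict.get? b x with
        | none => PySem.Dict.insert b x c
        | some m => if c < m then PySem.Dict.insert b x c else b) best) PySem.Dict.empty
  points.foldl (fun derived p =>
    let need : Int := if PySem.Set.contains sset p then 2 else 1
    if need ≤ PySem.Dict.getD best p need then PySem.Set.add derived p else derived) PySem.Set.empty

-- ===== PRECONDITION & SPEC =====
def Spec_derived_set_py (subset : List Int) (points : List Int) (opens : List (List Int)) (out : List Int) : Prop := out = derived_set_py_alt subset points opens
instance (subset : List Int) (points : List Int) (opens : List (List Int)) (out : List Int) : Decidable (Spec_derived_set_py subset points opens out) := by unfold Spec_derived_set_py; infer_instance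

-- ===== CLAIM (what is proved, stated in full; the proofs are below) =====
def Claim_equal_derived_set_py : Prop := ∀ (subset : List Int) (points : List Int) (opens : List (List Int)), Dom_derived_set_py subset points opens → Spec_derived_set_py subset points opens (derived_set_py subset points opens)

-- ===== LEMMAS AND PROOFS =====

-- |O ∩ subset| as computed by B
def pvC (subset : List Int) (o : List Int) : Int :=
  PySem.Set.len (PySem.Set.inter (PySem.Set.ofList o) (PySem.Set.ofList subset))

-- one min-update step on an optional running minimum
def pvOcomb (d : Option Int) (c : Int) : Option Int :=
  some (match d with | none => c | some m => min m c)

-- the counts of the open sets containing p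
def pvCands (subset : List Int) (p : Int) (opens : List (List Int)) : List Int :=
  opens.filterMap (fun o => if p ∈ o then some (pvC subset o) else none)

-- inner loop of B's first pass: every key of os gets its entry min-updated with c
lemma pv_inner (os : List Int) (hnd : os.Nodup) (b : PySem.Dict Int Int) (c p : Int) :
    (os.foldl (fun b x =>
        match PySem.Dict.get? b x with
        | none => PySem.Dict.insert b x c
        | some m => if c < m then PySem.Dict.insert b x c else b) b).get? p
      = if p ∈ os then pvOcomb (b.get? p) c else b.get? p := by
  induction os generalizing b with
  | nil => simp
  | cons x rest ih =>
    obtain ⟨hx, hnd'⟩ := List.nodup_cons.mp hnd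
    simp only [List.foldl_cons]
    rw [ih hnd']
    by_cases hpx : p = x
    · subst hpx
      have hpr : p ∉ rest := hx
      simp only [if_neg hpr, List.mem_cons, true_or, if_pos]
      cases hg : PySem.Dict.get? b p with
      | none => simp [PySem.Dict.get?_insert_self, pvOcomb]
      | some m =>
        by_cases hc : c < m
        · simp [hc, PySem.Dict.get?_insert_self, pvOcomb, min_eq_right (le_of_lt hc)]
        · simp [hc, pvOcomb, hg, min_eq_left (le_of_not_gt hc)]
    · have hstep : (match PySem.Dict.get? b x with
        | none => PySem.Dict.insert b x c
        | some m => if c < m then PySem.Dict.insert b x c else b).get? p = b.get? p := by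
        cases hg : PySem.Dict.get? b x with
        | none => exact PySem.Dict.get?_insert_of_ne b c hpx
        | some m =>
          by_cases hc : c < m
          · simp only [if_pos hc]; exact PySem.Dict.get?_insert_of_ne b c hpx
          · simp [hc]
      rw [hstep]
      simp [List.mem_cons, hpx]

-- outer loop of B's first pass: get? is the running minimum over the candidate counts
lemma pv_outer (subset : List Int) (opens : List (List Int)) (b : PySem.Dict Int Int) (p : Int) :
    (opens.foldl (fun best o =>
        let os := PySem.Set.ofList o
        let c : Int := PySem.Set.len (PySem.Set.inter os (PySem.Set.ofList subset))
        os.foldl (fun b x =>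
          match PySem.Dict.get? b x with
          | none => PySem.Dict.insert b x c
          | some m => if c < m then PySem.Dict.insert b x c else b) best) b).get? p
      = (pvCands subset p opens).foldl pvOcomb (b.get? p) := by
  induction opens generalizing b with
  | nil => simp [pvCands]
  | cons o rest ih =>
    simp only [List.foldl_cons]
    rw [ih]
    have h1 := pv_inner (PySem.Set.ofList o) (PySem.Set.nodup_ofList o) b
      (PySem.Set.len (PySem.Set.inter (PySem.Set.ofList o) (PySem.Set.ofList subset))) p
    by_cases hpo : p ∈ o
    · have : p ∈ PySem.Set.ofList o := (PySem.Set.mem_ofList o p).mpr hpo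
      rw [h1, if_pos this]
      simp [pvCands, hpo, pvC]
    · have : p ∉ PySem.Set.ofList o := fun h => hpo ((PySem.Set.mem_ofList o p).mp h)
      rw [h1, if_neg this]
      simp [pvCands, hpo]

-- the threshold test on the running minimum says: every candidate count reaches the threshold
lemma pv_min_thresh (l : List Int) (d : Option Int) (need : Int) :
    need ≤ (l.foldl pvOcomb d).getD need ↔ (need ≤ d.getD need ∧ ∀ v ∈ l, need ≤ v) := by
  induction l generalizing d with
  | nil => simp
  | cons v rest ih =>
    simp only [List.foldl_cons, ih, List.mem_cons]
    cases d with
    | none =>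
      constructor
      · rintro ⟨h1, h2⟩
        simp only [pvOcomb, Option.getD_some] at h1
        exact ⟨le_refl _, fun w hw => hw.elim (fun e => e ▸ h1) (h2 w)⟩
      · rintro ⟨_, h2⟩
        exact ⟨by simpa [pvOcomb] using h2 v (Or.inl rfl), fun w hw => h2 w (Or.inr hw)⟩
    | some m =>
      simp only [pvOcomb, Option.getD_some, le_min_iff]
      constructor
      · rintro ⟨⟨hm, hv⟩, h2⟩
        exact ⟨hm, fun w hw => hw.elim (fun e => e ▸ hv) (h2 w)⟩
      · rintro ⟨hm, h2⟩
        exact ⟨⟨hm, h2 v (Or.inl rfl)⟩, fun w hw => h2 w (Or.inr hw)⟩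

-- per open set O with p ∈ O: O meets subset - {p} iff |O ∩ subset| reaches the threshold
lemma pv_per_open (subset o : List Int) (p : Int) (hpo : p ∈ o) :
    ((PySem.Set.inter (PySem.Set.ofList o) (PySem.Set.diff (PySem.Set.ofList subset) [p])) ≠ []
      ↔ (if p ∈ subset then (2:Int) else 1) ≤ pvC subset o) := by
  have hnd : (PySem.Set.inter (PySem.Set.ofList o) (PySem.Set.ofList subset)).Nodup :=
    PySem.Set.nodup_inter _ _ (PySem.Set.nodup_ofList o)
  set l := PySem.Set.inter (PySem.Set.ofList o) (PySem.Set.ofList subset) with hl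
  have hmem : ∀ x, x ∈ l ↔ x ∈ o ∧ x ∈ subset := by
    intro x
    rw [hl, PySem.Set.mem_inter, PySem.Set.mem_ofList, PySem.Set.mem_ofList]
  have hne : (PySem.Set.inter (PySem.Set.ofList o) (PySem.Set.diff (PySem.Set.ofList subset) [p])) ≠ []
      ↔ ∃ x, x ∈ o ∧ x ∈ subset ∧ x ≠ p := by
    constructor
    · intro h
      obtain ⟨x, hx⟩ := List.exists_mem_of_ne_nil _ h
      rw [PySem.Set.mem_inter, PySem.Set.mem_ofList, PySem.Set.mem_diff] at hx
      exact ⟨x, hx.1, (PySem.Set.mem_ofList subset x).mp hx.2.1, by simpa using hx.2.2⟩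
    · rintro ⟨x, h1, h2, h3⟩
      have : x ∈ PySem.Set.inter (PySem.Set.ofList o) (PySem.Set.diff (PySem.Set.ofList subset) [p]) := by
        rw [PySem.Set.mem_inter, PySem.Set.mem_ofList, PySem.Set.mem_diff, PySem.Set.mem_ofList]
        exact ⟨h1, h2, by simpa using h3⟩
      exact List.ne_nil_of_mem this
  rw [hne]
  have hlen : pvC subset o = (l.length : Int) := by simp [pvC, PySem.Set.len, hl]
  by_cases hps : p ∈ subset
  · have hpl : p ∈ l := (hmem p).mpr ⟨hpo, hps⟩
    simp only [if_pos hps, hlen]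
    have hcard : l.length = l.toFinset.card := (List.toFinset_card_of_nodup hnd).symm
    constructor
    · rintro ⟨x, hx1, hx2, hx3⟩
      have hxl : x ∈ l := (hmem x).mpr ⟨hx1, hx2⟩
      have : 1 < l.toFinset.card := Finset.one_lt_card.mpr
        ⟨p, List.mem_toFinset.mpr hpl, x, List.mem_toFinset.mpr hxl, fun e => hx3 (e.symm)⟩
      omega
    · intro h
      have h2 : 1 < l.toFinset.card := by omega
      obtain ⟨a, ha, b, hb, hab⟩ := Finset.one_lt_card.mp h2
      rcases eq_or_ne a p with rfl | hap
      · obtain ⟨hb1, hb2⟩ := (hmem b).mp (List.mem_toFinset.mp hb)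
        exact ⟨b, hb1, hb2, fun e => hab e.symm⟩
      · obtain ⟨ha1, ha2⟩ := (hmem a).mp (List.mem_toFinset.mp ha)
        exact ⟨a, ha1, ha2, hap⟩
  · simp only [if_neg hps, hlen]
    constructor
    · rintro ⟨x, hx1, hx2, _⟩
      have : x ∈ l := (hmem x).mpr ⟨hx1, hx2⟩
      have := List.length_pos_of_mem this
      omega
    · intro h
      have : l ≠ [] := by
        intro e; rw [e] at h; simp at h
      obtain ⟨x, hx⟩ := List.exists_mem_of_ne_nil l this
      obtain ⟨hx1, hx2⟩ := (hmem x).mp hx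
      exact ⟨x, hx1, hx2, fun e => hps (e ▸ hx2)⟩

-- the two per-point conditions coincide
lemma pv_cond (subset : List Int) (opens : List (List Int)) (p : Int) :
    ((opens.filter (fun o => PySem.Set.contains (PySem.Set.ofList o) p)).all
        (fun o => !(PySem.Set.inter (PySem.Set.ofList o)
            (PySem.Set.diff (PySem.Set.ofList subset) [p])).isEmpty) = true)
      ↔ ((if PySem.Set.contains (PySem.Set.ofList subset) p then (2:Int) else 1) ≤
          PySem.Dict.getD
            (opens.foldl (fun best o =>
              let os := PySem.Set.ofList o
              let c : Int := PySem.Set.len (PySem.Set.inter os (PySem.Set.ofList subset))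
              os.foldl (fun b x =>
                match PySem.Dict.get? b x with
                | none => PySem.Dict.insert b x c
                | some m => if c < m then PySem.Dict.insert b x c else b) best) PySem.Dict.empty)
            p (if PySem.Set.contains (PySem.Set.ofList subset) p then (2:Int) else 1)) := by
  have hcontains : PySem.Set.contains (PySem.Set.ofList subset) p = decide (p ∈ subset) := by
    by_cases h : p ∈ subset
    · simp [h]
    · simp [h]
  have hget : (PySem.Dict.get? (opens.foldl (fun best o =>
        let os := PySem.Set.ofList o
        let c : Int := PySem.Set.len (PySem.Set.inter os (PySem.Set.ofList subset))
        os.foldl (fun b x =>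
          match PySem.Dict.get? b x with
          | none => PySem.Dict.insert b x c
          | some m => if c < m then PySem.Dict.insert b x c else b) best) PySem.Dict.empty) p)
      = (pvCands subset p opens).foldl pvOcomb none := by
    rw [pv_outer]; rfl
  set need : Int := if PySem.Set.contains (PySem.Set.ofList subset) p then (2:Int) else 1 with hneed
  rw [PySem.Dict.getD, hget, pv_min_thresh]
  have hneed' : need = if p ∈ subset then (2:Int) else 1 := by
    rw [hneed, hcontains]; by_cases h : p ∈ subset <;> simp [h]
  constructor
  · intro hall
    refine ⟨by simp, ?_⟩
    intro v hv
    simp only [pvCands, List.mem_filterMap] at hv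
    obtain ⟨o, ho, hvo⟩ := hv
    by_cases hpo : p ∈ o
    · rw [if_pos hpo] at hvo
      have hvo' : v = pvC subset o := by simpa using hvo.symm
      have h1 : (!(PySem.Set.inter (PySem.Set.ofList o)
          (PySem.Set.diff (PySem.Set.ofList subset) [p])).isEmpty) = true := by
        have := List.all_eq_true.mp hall o (List.mem_filter.mpr ⟨ho, by
          rw [PySem.Set.contains_iff, PySem.Set.mem_ofList]; exact hpo⟩)
        exact this
      have hne : (PySem.Set.inter (PySem.Set.ofList o)
          (PySem.Set.diff (PySem.Set.ofList subset) [p])) ≠ [] := by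
        intro e; rw [e] at h1; simp at h1
      rw [hvo', hneed']
      exact (pv_per_open subset o p hpo).mp hne
    · rw [if_neg hpo] at hvo; exact absurd hvo (by simp)
  · rintro ⟨_, hall⟩
    rw [List.all_eq_true]
    intro o ho
    obtain ⟨ho1, ho2⟩ := List.mem_filter.mp ho
    have hpo : p ∈ o := by
      rw [PySem.Set.contains_iff, PySem.Set.mem_ofList] at ho2; exact ho2
    have hv : pvC subset o ∈ pvCands subset p opens := by
      simp only [pvCands, List.mem_filterMap]
      exact ⟨o, ho1, by rw [if_pos hpo]⟩
    have := hall _ hv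
    rw [hneed'] at this
    have hne := (pv_per_open subset o p hpo).mpr this
    simpa using hne

-- ===== VERDICT (by name: the statement is the Claim_ definition above) =====
theorem derived_set_py_spec : Claim_equal_derived_set_py := by
  intro subset points opens _
  unfold Spec_derived_set_py derived_set_py derived_set_py_alt
  simp only []
  congr 1
  funext derived p
  by_cases h : ((if PySem.Set.contains (PySem.Set.ofList subset) p then (2:Int) else 1) ≤
      PySem.Dict.getD
        (opens.foldl (fun best o =>
          let os := PySem.Set.ofList o
          let c : Int := PySem.Set.len (PySem.Set.inter os (PySem.Set.ofList subset))
          os.foldl (fun b x =>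
            match PySem.Dict.get? b x with
            | none => PySem.Dict.insert b x c
            | some m => if c < m then PySem.Dict.insert b x c else b) best) PySem.Dict.empty)
        p (if PySem.Set.contains (PySem.Set.ofList subset) p then (2:Int) else 1))
  · rw [if_pos ((pv_cond subset opens p).mpr h), if_pos h]
  · rw [if_neg (fun hc => h ((pv_cond subset opens p).mp hc)), if_neg h]
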